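-- pv_equiv track=rewrite | github.com/Sayantan-coder/Python-Easy-Level-Practice | next_number_divisible.py | divisible_by_b
-- ===== SOURCE A (Python) =====
-- def divisible_by_b(a: int, b: int) -> int:
--     if a % b == 0:
--         num = a + 1
--         while num % b != 0:
--             num += 1
--         return num
--     else:
--         while a % b != 0:
--             a += 1
--         return a
-- ===== SOURCE B (Python) =====
-- def divisible_by_b(a: int, b: int) -> int:
--     m = abs(b)
--     return a + m - a % m
-- ===== Notes on version B (the rewrite author's own statement) =====
-- stated objective: faster
-- what changed: Replaced the increment-by-one search loop with the closed-form next-multiple formula a + |b| - a % |b|.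
import Mathlib
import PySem

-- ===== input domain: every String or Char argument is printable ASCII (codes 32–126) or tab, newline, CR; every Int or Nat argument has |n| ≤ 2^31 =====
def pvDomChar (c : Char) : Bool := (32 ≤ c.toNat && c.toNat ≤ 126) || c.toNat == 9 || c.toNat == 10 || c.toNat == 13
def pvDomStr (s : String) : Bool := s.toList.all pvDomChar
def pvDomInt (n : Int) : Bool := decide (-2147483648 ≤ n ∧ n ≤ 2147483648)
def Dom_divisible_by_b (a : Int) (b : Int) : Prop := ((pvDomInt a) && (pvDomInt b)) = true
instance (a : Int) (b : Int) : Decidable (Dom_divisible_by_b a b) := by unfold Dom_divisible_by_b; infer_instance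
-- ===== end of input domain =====

-- B replaces A's increment-by-one search loop with the closed-form next-multiple formula (faster: O(1) vs O(|b|)).

-- termination lemma for the while-loop port (cited by decreasing_by)
theorem pvStep_emod (m x : Int) (hm : 0 < m) (hx : x % m ≠ 0) : (x - 1) % m = x % m - 1 := by
  have h0 : 0 ≤ x % m := Int.emod_nonneg x (by omega)
  have h1 : x % m < m := Int.emod_lt_of_pos x hm
  by_cases hm1 : m = 1
  · subst hm1; omega
  · have h2 : (x - 1) % m = (x % m - 1 % m) % m := Int.sub_emod x 1 m
    have h3 : (1 : Int) % m = 1 := Int.emod_eq_of_lt (by omega) (by omega)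
    rw [h2, h3, Int.emod_eq_of_lt (by omega) (by omega)]

theorem pvLoop_dec (b num : Int) (hb : b ≠ 0) (hm : PySem.Int.mod num b ≠ 0) :
    (PySem.Int.mod (-(num + 1)) (b.natAbs : Int)).toNat
      < (PySem.Int.mod (-num) (b.natAbs : Int)).toNat := by
  have hmpos : (0 : Int) < (b.natAbs : Int) := by
    have := Int.natAbs_pos.mpr hb; exact_mod_cast this
  have hdvd : ¬ b ∣ num := fun h => hm ((PySem.Int.mod_eq_zero_iff_dvd num b).mpr h)
  have hne : (-num) % (b.natAbs : Int) ≠ 0 := by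
    intro h
    exact hdvd ((Int.natAbs_dvd).mp ((dvd_neg).mp (Int.dvd_of_emod_eq_zero h)))
  have h0 : 0 ≤ (-num) % (b.natAbs : Int) := Int.emod_nonneg _ (by omega)
  simp only [PySem.Int.mod_eq_emod_of_pos hmpos]
  have hstep : (-(num + 1)) % (b.natAbs : Int) = (-num) % (b.natAbs : Int) - 1 := by
    have := pvStep_emod (b.natAbs : Int) (-num) hmpos hne
    simpa [show -(num + 1) = -num - 1 by ring] using this
  omega

-- ===== PORT A =====
-- the while loop 'while num % b != 0: num += 1' (the 'b ≠ 0' conjunct only makes it total;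
-- under Pre_ it is Python's condition)
def pvWhileA (b : Int) (num : Int) : Int :=
  if h : b ≠ 0 ∧ PySem.Int.mod num b ≠ 0 then pvWhileA b (num + 1) else num
termination_by (PySem.Int.mod (-num) (b.natAbs : Int)).toNat
decreasing_by exact pvLoop_dec b num h.1 h.2

def divisible_by_b (a : Int) (b : Int) : Int :=
  if PySem.Int.mod a b = 0 then pvWhileA b (a + 1) else pvWhileA b a

-- ===== PORT B =====
def divisible_by_b_alt (a : Int) (b : Int) : Int :=
  a + |b| - PySem.Int.mod a |b|

-- ===== PRECONDITION & SPEC =====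
-- Pre_ excludes only b = 0, where Python A raises ZeroDivisionError.
def Pre_divisible_by_b (a : Int) (b : Int) : Prop := b ≠ 0
instance (a : Int) (b : Int) : Decidable (Pre_divisible_by_b a b) := by unfold Pre_divisible_by_b; infer_instance
def pvWitness_divisible_by_b : Int × Int := (7, 3)

def Spec_divisible_by_b (a : Int) (b : Int) (out : Int) : Prop := out = divisible_by_b_alt a b
instance (a : Int) (b : Int) (out : Int) : Decidable (Spec_divisible_by_b a b out) := by unfold Spec_divisible_by_b; infer_instance

-- ===== CLAIM (what is proved, stated in full; the proofs are below) =====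
def Claim_equal_divisible_by_b : Prop := ∀ (a : Int) (b : Int), Dom_divisible_by_b a b → Pre_divisible_by_b a b → Spec_divisible_by_b a b (divisible_by_b a b)

-- ===== LEMMAS AND PROOFS =====

-- characterisation of the loop: it adds the distance to the next multiple of |b| (0 if already there)
theorem pvWhileA_eq (b : Int) (hb : b ≠ 0) (num : Int) :
    pvWhileA b num = num + (-num) % (b.natAbs : Int) := by
  have hmpos : (0 : Int) < (b.natAbs : Int) := by
    have := Int.natAbs_pos.mpr hb; exact_mod_cast this
  suffices H : ∀ k num, (PySem.Int.mod (-num) (b.natAbs : Int)).toNat = k →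
      pvWhileA b num = num + (-num) % (b.natAbs : Int) from H _ num rfl
  intro k
  induction k using Nat.strong_induction_on with
  | _ k ih =>
    intro num hk
    by_cases h : PySem.Int.mod num b ≠ 0
    · rw [pvWhileA, dif_pos ⟨hb, h⟩]
      have hdec := pvLoop_dec b num hb h
      rw [ih _ (hk ▸ hdec) (num + 1) rfl]
      have hne : (-num) % (b.natAbs : Int) ≠ 0 := by
        intro h0
        exact h ((PySem.Int.mod_eq_zero_iff_dvd num b).mpr
          ((Int.natAbs_dvd).mp ((dvd_neg).mp (Int.dvd_of_emod_eq_zero h0))))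
      have hstep : (-(num + 1)) % (b.natAbs : Int) = (-num) % (b.natAbs : Int) - 1 := by
        have := pvStep_emod (b.natAbs : Int) (-num) hmpos hne
        simpa [show -(num + 1) = -num - 1 by ring] using this
      rw [hstep]; ring
    · push_neg at h
      rw [pvWhileA, dif_neg (by tauto)]
      have hdvd : ((b.natAbs : Int)) ∣ -num :=
        (dvd_neg).mpr ((Int.natAbs_dvd).mpr ((PySem.Int.mod_eq_zero_iff_dvd num b).mp h))
      rw [Int.emod_eq_zero_of_dvd hdvd]; ring

theorem pvNeg_emod (m a : Int) (hm : 0 < m) (ha : a % m ≠ 0) : (-a) % m = m - a % m := by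
  have h0 : 0 ≤ a % m := Int.emod_nonneg a (by omega)
  have h1 : a % m < m := Int.emod_lt_of_pos a hm
  have key : (-a) % m = (m - a % m) % m := by
    rw [Int.emod_eq_emod_iff_emod_sub_eq_zero]
    have hd := Int.mul_ediv_add_emod a m
    have h2 : -a - (m - a % m) = m * (-(a / m) - 1) := by linear_combination hd
    rw [h2]; exact Int.mul_emod_right _ _
  rw [key, Int.emod_eq_of_lt (by omega) (by omega)]

-- ===== VERDICT (by name: the statement is the Claim_ definition above) =====
theorem divisible_by_b_spec : Claim_equal_divisible_by_b := by
  intro a b _ hb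
  unfold Spec_divisible_by_b divisible_by_b divisible_by_b_alt
  have hmpos : (0 : Int) < (b.natAbs : Int) := by
    have := Int.natAbs_pos.mpr hb; exact_mod_cast this
  have habs : |b| = (b.natAbs : Int) := (Int.natCast_natAbs b).symm
  rw [habs, PySem.Int.mod_eq_emod_of_pos hmpos]
  by_cases h : PySem.Int.mod a b = 0
  · rw [if_pos h, pvWhileA_eq b hb]
    have hdvd : ((b.natAbs : Int)) ∣ a :=
      (Int.natAbs_dvd).mpr ((PySem.Int.mod_eq_zero_iff_dvd a b).mp h)
    have ha0 : a % (b.natAbs : Int) = 0 := Int.emod_eq_zero_of_dvd hdvd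
    have hne : (-(a + 1)) % (b.natAbs : Int) = (b.natAbs : Int) - 1 := by
      have h1 : (a + 1) % (b.natAbs : Int) = 1 % (b.natAbs : Int) := by
        rw [Int.add_emod, ha0]; simp
      by_cases hm1 : (b.natAbs : Int) = 1
      · rw [hm1]; omega
      · have h2 : (a + 1) % (b.natAbs : Int) = 1 := by
          rw [h1]; exact Int.emod_eq_of_lt (by omega) (by omega)
        have := pvNeg_emod (b.natAbs : Int) (a + 1) hmpos (by omega)
        rw [this, h2]
    rw [hne, ha0]; ring
  · rw [if_neg h, pvWhileA_eq b hb]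
    have hne : a % (b.natAbs : Int) ≠ 0 := by
      intro h0
      exact h ((PySem.Int.mod_eq_zero_iff_dvd a b).mpr
        ((Int.natAbs_dvd).mp (Int.dvd_of_emod_eq_zero h0)))
    rw [pvNeg_emod (b.natAbs : Int) a hmpos hne]; ring
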